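-- pv_equiv track=rewrite | github.com/FPGA-Research-Manchester/OrkhestraFPGAStream | extra_scripts/module_data.py | collect_all_substrings
-- ===== SOURCE A (Python) =====
-- def collect_all_substrings(input_str):
--     substrings = []
--     for i in range(len(input_str)):
--         current_string = ""
--         for j in range(i, len(input_str)):
--             current_string += input_str[j]
--             substrings.append(current_string)
--     return sorted(substrings, key=lambda x: len(x))
-- ===== SOURCE B (Python) =====
-- def collect_all_substrings(input_str):
--     n = len(input_str)
--     result = []
--     for length in range(1, n + 1):
--         for start in range(n - length + 1):
--             result.append(input_str[start:start + length])
--     return result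
-- ===== Notes on version B (the rewrite author's own statement) =====
-- stated objective: simpler
-- what changed: B enumerates substrings by increasing length (then start index), emitting them directly in the required order, so the final sort and the incremental string accumulator of A disappear.
import Mathlib
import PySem

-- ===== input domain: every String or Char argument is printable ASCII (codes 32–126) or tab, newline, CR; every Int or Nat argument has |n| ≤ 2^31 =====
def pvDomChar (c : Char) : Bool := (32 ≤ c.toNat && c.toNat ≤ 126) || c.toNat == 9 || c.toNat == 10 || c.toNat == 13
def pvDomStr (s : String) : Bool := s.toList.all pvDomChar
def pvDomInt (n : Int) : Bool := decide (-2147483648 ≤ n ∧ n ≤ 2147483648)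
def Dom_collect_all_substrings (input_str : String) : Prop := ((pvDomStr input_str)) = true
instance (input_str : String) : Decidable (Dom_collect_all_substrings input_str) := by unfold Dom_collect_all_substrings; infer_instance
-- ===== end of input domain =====

-- B enumerates substrings by increasing length, emitting them already in A's sorted order, so A's final sort disappears; same return values.


-- ===== PORT A =====
-- inner loop `for j in range(i, len): current_string += input_str[j]; substrings.append(current_string)`
-- (strings ported through List Char; `input_str[j]` is always in range here, guarded by the loop bound)
def pvInnerA (cs : List Char) (j : Nat) (cur : List Char) (acc : List (List Char)) :
    List (List Char) :=
  if h : j < cs.length then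
    pvInnerA cs (j + 1) (cur ++ [cs[j]]) (acc ++ [cur ++ [cs[j]]])
  else acc
termination_by cs.length - j

-- outer loop `for i in range(len(input_str)): current_string = ""; <inner loop>`
def pvSubsA (cs : List Char) : List (List Char) :=
  (List.range cs.length).foldl (fun acc i => pvInnerA cs i [] acc) []

-- `return sorted(substrings, key=lambda x: len(x))`
def collect_all_substrings (input_str : String) : List String :=
  (PySem.List.sorted (pvSubsA input_str.toList) (fun x => x.length)).map String.mk

-- ===== PORT B =====
-- inner loop of Source B: `for start in range(n - length + 1): result.append(input_str[start:start+length])`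
-- (the slice indices satisfy 0 ≤ start and start+length ≤ n, where drop/take is exactly Python's slice)
def pvRowB (cs : List Char) (L : Nat) : List (List Char) :=
  (List.range (cs.length - L + 1)).map (fun i => (cs.drop i).take L)

-- `for length in range(1, n + 1): <inner loop>`, returning result directly
def collect_all_substrings_alt (input_str : String) : List String :=
  ((List.range' 1 input_str.toList.length).flatMap (pvRowB input_str.toList)).map String.mk

-- ===== PRECONDITION & SPEC =====
def Spec_collect_all_substrings (input_str : String) (out : List String) : Prop := out = collect_all_substrings_alt input_str
instance (input_str : String) (out : List String) : Decidable (Spec_collect_all_substrings input_str out) := by unfold Spec_collect_all_substrings; infer_instance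

-- ===== CLAIM (what is proved, stated in full; the proofs are below) =====
def Claim_equal_collect_all_substrings : Prop := ∀ (input_str : String), Dom_collect_all_substrings input_str → Spec_collect_all_substrings input_str (collect_all_substrings input_str)

-- ===== LEMMAS AND PROOFS =====

-- the substrings A collects for a fixed start index, as a closed form
def pvGenA (cs : List Char) : List (List Char) :=
  (List.range cs.length).flatMap
    (fun i => (List.range (cs.length - i)).map (fun t => ((cs.drop i).take (t + 1))))

lemma pvInnerA_eq (cs : List Char) (j : Nat) (cur : List Char) (acc : List (List Char)) :
    pvInnerA cs j cur acc =
      acc ++ (List.range (cs.length - j)).map (fun t => cur ++ ((cs.drop j).take (t + 1))) := by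
  fun_induction pvInnerA cs j cur acc with
  | case1 j cur acc h ih =>
    rw [ih]
    have hd : cs.drop j = cs[j] :: cs.drop (j + 1) := (List.getElem_cons_drop h).symm
    have hr : cs.length - j = (cs.length - (j + 1)) + 1 := by omega
    rw [hr, List.range_succ_eq_map, hd]
    simp only [List.map_cons, List.map_map, Function.comp, List.take_succ_cons,
      List.take_zero, List.append_assoc, List.singleton_append, List.append_nil]
    simp [hd, List.append_assoc]
  | case2 j cur acc h =>
    have : cs.length - j = 0 := by omega
    simp [this]

lemma pvSubsA_eq (cs : List Char) : pvSubsA cs = pvGenA cs := by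
  unfold pvSubsA pvGenA
  have : ∀ acc, (List.range cs.length).foldl (fun acc i => pvInnerA cs i [] acc) acc =
      acc ++ (List.range cs.length).flatMap
        (fun i => (List.range (cs.length - i)).map (fun t => ((cs.drop i).take (t + 1)))) := by
    intro acc
    have hfun : (fun (acc : List (List Char)) i => pvInnerA cs i [] acc) =
        (fun acc i => acc ++ (List.range (cs.length - i)).map (fun t => ((cs.drop i).take (t + 1)))) := by
      funext acc i
      rw [pvInnerA_eq]
      simp
    rw [hfun, PySem.List.foldl_append_eq_flatMap]
  simpa using this []

-- inserting x after every element it is not `before`, and before the rest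
lemma insertBy_middle {α : Type} (p : α → α → Bool) (x : α) (P Q : List α)
    (hP : ∀ y ∈ P, p x y = false) (hQ : ∀ q qs, Q = q :: qs → p x q = true) :
    PySem.List.insertBy p x (P ++ Q) = P ++ x :: Q := by
  induction P with
  | nil =>
    cases Q with
    | nil => simp [PySem.List.insertBy]
    | cons q qs => simp [PySem.List.insertBy, hQ q qs rfl]
  | cons y P' ih =>
    have hy : p x y = false := hP y (by simp)
    simp only [List.cons_append, PySem.List.insertBy, hy]
    simp only [Bool.false_eq_true, if_false]
    rw [ih (fun y hy => hP y (by simp [hy]))]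

-- STABLE sort by a Nat key = concatenation of the key-classes in increasing key order
lemma sorted_groups {α : Type} (key : α → Nat) (xs : List α) (m : Nat)
    (h : ∀ x ∈ xs, key x < m) :
    PySem.List.sorted xs key =
      (List.range m).flatMap (fun k => xs.filter (fun x => key x = k)) := by
  induction xs using List.reverseRecOn with
  | nil => simp [PySem.List.sorted_eq_foldl_insertBy]
  | append_singleton xs x ih =>
    have hx : key x < m := h x (by simp)
    have hxs : ∀ y ∈ xs, key y < m := fun y hy => h y (by simp [hy])
    rw [PySem.List.sorted_eq_foldl_insertBy, List.foldl_append, ← PySem.List.sorted_eq_foldl_insertBy,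
      ih hxs]
    simp only [List.foldl_cons, List.foldl_nil]
    set j := key x with hj
    have hm : m = (j + 1) + (m - (j + 1)) := by omega
    set g : Nat → List α := fun k => xs.filter (fun y => key y = k) with hg
    set g' : Nat → List α := fun k => (xs ++ [x]).filter (fun y => key y = k) with hg'
    have hsplit : List.range m = List.range (j + 1) ++ (List.range (m - (j + 1))).map (fun s => (j + 1) + s) := by
      have h0 := @List.range_add (j + 1) (m - (j + 1))
      rw [← hm] at h0
      exact h0
    have hPmem : ∀ y ∈ (List.range (j + 1)).flatMap g, key y ≤ j := by
      intro y hy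
      rw [List.mem_flatMap] at hy
      obtain ⟨k, hk, hyk⟩ := hy
      rw [List.mem_range] at hk
      rw [hg, List.mem_filter] at hyk
      have hky : key y = k := by simpa using hyk.2
      omega
    have hQmem : ∀ y ∈ ((List.range (m - (j + 1))).map (fun s => (j + 1) + s)).flatMap g, j < key y := by
      intro y hy
      rw [List.mem_flatMap] at hy
      obtain ⟨k, hk, hyk⟩ := hy
      rw [List.mem_map] at hk
      obtain ⟨s, hs, rfl⟩ := hk
      rw [hg, List.mem_filter] at hyk
      have hky : key y = (j + 1) + s := by simpa using hyk.2
      omega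
    rw [hsplit, List.flatMap_append, List.flatMap_append]
    have hPfalse : ∀ y ∈ (List.range (j + 1)).flatMap g,
        (fun a b => decide (key a < key b)) x y = false := by
      intro y hy
      have := hPmem y hy
      simp only [decide_eq_false_iff_not]
      omega
    have hQtrue : ∀ q qs,
        ((List.range (m - (j + 1))).map (fun s => (j + 1) + s)).flatMap g = q :: qs →
        (fun a b => decide (key a < key b)) x q = true := by
      intro q qs hq
      have hqm : q ∈ ((List.range (m - (j + 1))).map (fun s => (j + 1) + s)).flatMap g := by
        rw [hq]; simp
      have := hQmem q hqm
      simp only [decide_eq_true_eq]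
      omega
    rw [insertBy_middle (fun a b => decide (key a < key b)) x
      ((List.range (j + 1)).flatMap g)
      (((List.range (m - (j + 1))).map (fun s => (j + 1) + s)).flatMap g) hPfalse hQtrue]
    -- upper groups unchanged by appending x
    have hQ : ((List.range (m - (j + 1))).map (fun s => (j + 1) + s)).flatMap g' =
        ((List.range (m - (j + 1))).map (fun s => (j + 1) + s)).flatMap g := by
      apply List.flatMap_congr
      intro k hk
      simp only [List.mem_map, List.mem_range] at hk
      obtain ⟨s, _, hs⟩ := hk
      simp only [hg', hg, List.filter_append, List.filter_cons, List.filter_nil]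
      have hne : ¬ (key x = k) := by omega
      simp [hne]
    -- lower groups: only group j gains [x], at its end
    have hP : (List.range (j + 1)).flatMap g' = (List.range (j + 1)).flatMap g ++ [x] := by
      rw [List.range_succ, List.flatMap_append, List.flatMap_append, List.append_assoc]
      congr 1
      · apply List.flatMap_congr
        intro k hk
        simp only [List.mem_range] at hk
        simp only [hg', hg, List.filter_append, List.filter_cons, List.filter_nil]
        have : ¬ (key x = k) := by omega
        simp [this]
      · simp only [List.flatMap_cons, List.flatMap_nil, List.append_nil, hg', hg,
          List.filter_append, List.filter_cons, List.filter_nil]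
        have hxx : key x = j := hj.symm
        simp [hxx]
    rw [hQ, hP]
    simp
-- helper: filtering a range for one value
lemma range_filter_eq (N j : Nat) :
    (List.range N).filter (fun t => t = j) = if j < N then [j] else [] := by
  induction N with
  | zero => simp
  | succ N ih =>
    rw [List.range_succ, List.filter_append, ih, List.filter_cons]
    by_cases h : N = j
    · subst h
      have : ¬ (N < N) := by omega
      simp [this]
    · by_cases h2 : j < N
      · have : j < N + 1 := by omega
        simp [h, h2, this]
      · have : ¬ (j < N + 1) := by omega
        simp [h, h2, this]

lemma flatMap_singleton_map {α β : Type} (f : α → β) (l : List α) :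
    List.flatMap (fun x => [f x]) l = l.map f := by
  induction l with
  | nil => rfl
  | cons x t ih => simp [ih]

-- the length-k class of A's collected list is exactly B's row k (1 ≤ k ≤ n)
lemma genA_filter (cs : List Char) (k : Nat) (hk1 : 1 ≤ k) (hk2 : k ≤ cs.length) :
    (pvGenA cs).filter (fun x => x.length = k) = pvRowB cs k := by
  set n := cs.length with hn
  unfold pvGenA pvRowB
  rw [List.filter_flatMap]
  have hinner : ∀ i ∈ List.range n,
      ((List.range (n - i)).map (fun t => ((cs.drop i).take (t + 1)))).filter
        (fun x => x.length = k) =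
      if k - 1 < n - i then [(cs.drop i).take k] else [] := by
    intro i hi
    simp only [List.mem_range] at hi
    rw [List.filter_map]
    have hc : (List.range (n - i)).filter
        ((fun (x : List Char) => decide (x.length = k)) ∘ (fun t => ((cs.drop i).take (t + 1)))) =
        (List.range (n - i)).filter (fun t => t = k - 1) := by
      apply List.filter_congr
      intro t ht
      simp only [List.mem_range] at ht
      have hlen : ((cs.drop i).take (t + 1)).length = t + 1 := by
        simp [List.length_take, List.length_drop]; omega
      simp only [Function.comp, hlen]
      exact decide_eq_decide.mpr (by omega)
    rw [hc, range_filter_eq]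
    by_cases h : k - 1 < n - i
    · have : k - 1 + 1 = k := by omega
      simp [h, this]
    · simp [h]
  rw [List.flatMap_congr hinner]
  have hsplitn : List.range n = List.range (n - k + 1) ++ (List.range (k - 1)).map (fun s => (n - k + 1) + s) := by
    rw [← List.range_add]; congr 1; omega
  rw [hsplitn, List.flatMap_append]
  have h2 : ((List.range (k - 1)).map (fun s => (n - k + 1) + s)).flatMap
      (fun i => if k - 1 < n - i then [(cs.drop i).take k] else []) = [] := by
    apply List.flatMap_eq_nil_iff.mpr
    intro i hi
    simp only [List.mem_map, List.mem_range] at hi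
    obtain ⟨s, hs, hsi⟩ := hi
    have : ¬ (k - 1 < n - i) := by omega
    simp [this]
  rw [h2, List.append_nil]
  have hall : ∀ i ∈ List.range (n - k + 1),
      (if k - 1 < n - i then [(cs.drop i).take k] else []) = [(cs.drop i).take k] := by
    intro i hi
    simp only [List.mem_range] at hi
    have : k - 1 < n - i := by omega
    simp [this]
  rw [List.flatMap_congr hall, flatMap_singleton_map]

lemma genA_filter_zero (cs : List Char) :
    (pvGenA cs).filter (fun x => x.length = 0) = [] := by
  rw [List.filter_eq_nil_iff]
  intro a ha
  unfold pvGenA at ha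
  simp only [List.mem_flatMap, List.mem_map, List.mem_range] at ha
  obtain ⟨i, hi, t, ht, rfl⟩ := ha
  simp only [decide_eq_true_eq, List.length_take, List.length_drop]
  omega

lemma genA_len_lt (cs : List Char) :
    ∀ x ∈ pvGenA cs, x.length < cs.length + 1 := by
  intro x hx
  unfold pvGenA at hx
  simp only [List.mem_flatMap, List.mem_map, List.mem_range] at hx
  obtain ⟨i, hi, t, ht, rfl⟩ := hx
  simp only [List.length_take, List.length_drop]
  omega

-- ===== VERDICT (by name: the statement is the Claim_ definition above) =====
theorem collect_all_substrings_spec : Claim_equal_collect_all_substrings := by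
  intro input_str _
  unfold Spec_collect_all_substrings collect_all_substrings collect_all_substrings_alt
  congr 1
  set cs := input_str.toList with hcs
  rw [pvSubsA_eq, sorted_groups (fun x => x.length) (pvGenA cs) (cs.length + 1) (genA_len_lt cs)]
  rw [List.range_succ_eq_map, List.flatMap_cons, genA_filter_zero, List.nil_append,
    List.range'_eq_map_range]
  rw [List.flatMap_map, List.flatMap_map]
  apply List.flatMap_congr
  intro k hk
  simp only [List.mem_range] at hk
  simp only [Nat.succ_eq_add_one]
  have h1 : (1 : Nat) + k = k + 1 := by omega
  rw [h1]
  exact genA_filter cs (k + 1) (by omega) (by omega)
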